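-- pv_equiv track=rewrite | github.com/Julien-Gelles/Pixeliser | pixeliser.py | generate_symbols
-- ===== SOURCE A (Python) =====
-- def generate_symbols(color_list):
--     n = len(color_list)
--     alphabet = "ABCDEFGHIJKLMNOPQRSTUVWXYZ"
--     symbols = []
--
--     if n <= 26:
--         return list(alphabet[:n])
--
--     suffix = 0
--     while len(symbols) < n:
--         for letter in alphabet:
--             symbols.append(f"{letter}{suffix}")
--             if len(symbols) >= n:
--                 return symbols
--         suffix += 1
-- ===== SOURCE B (Python) =====
-- def generate_symbols(color_list):
--     n = len(color_list)
--     alphabet = "ABCDEFGHIJKLMNOPQRSTUVWXYZ"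
--     if n <= 26:
--         return list(alphabet[:n])
--     return [f"{alphabet[i % 26]}{i // 26}" for i in range(n)]
-- ===== Notes on version B (the rewrite author's own statement) =====
-- stated objective: simpler
-- what changed: Each symbol for n>26 is computed directly from its index by i%26 / i//26 closed-form arithmetic in one comprehension, replacing the nested while/for loops with a mutable suffix counter and mid-loop early return.
import Mathlib
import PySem

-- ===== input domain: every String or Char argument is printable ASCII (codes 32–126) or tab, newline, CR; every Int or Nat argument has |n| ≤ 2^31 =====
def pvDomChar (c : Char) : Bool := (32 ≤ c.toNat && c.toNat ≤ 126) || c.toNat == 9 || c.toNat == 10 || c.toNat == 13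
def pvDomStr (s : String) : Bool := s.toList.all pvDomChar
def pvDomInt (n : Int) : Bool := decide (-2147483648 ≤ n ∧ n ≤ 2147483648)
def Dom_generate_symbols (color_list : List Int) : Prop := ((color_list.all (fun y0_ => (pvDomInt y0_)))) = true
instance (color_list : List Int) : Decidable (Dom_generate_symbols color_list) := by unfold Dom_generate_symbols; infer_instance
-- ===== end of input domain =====

-- B computes each symbol for n>26 directly from its index via i%26 and i//26 (one pass, no suffix counter); same return value.


-- ===== PORT A =====
def pvAlph : List Char := "ABCDEFGHIJKLMNOPQRSTUVWXYZ".toList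

-- inner 'for letter in alphabet' loop: appends f"{letter}{suffix}"; returns (symbols, true) on early return
def pvInner (n : Nat) (symbols : List String) (suffix : Nat) : List Char → List String × Bool
  | [] => (symbols, false)
  | c :: cs =>
      let symbols' := symbols ++ [String.ofList [c] ++ PySem.Int.toStr (suffix : Int)]
      if n ≤ symbols'.length then (symbols', true) else pvInner n symbols' suffix cs

-- outer 'while len(symbols) < n' loop; fuel bounds the number of outer passes (each adds 26 symbols)
def pvOuter (n : Nat) : Nat → List String → Nat → List String
  | 0, symbols, _ => symbols
  | fuel + 1, symbols, suffix =>
      if symbols.length < n then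
        match pvInner n symbols suffix pvAlph with
        | (res, true) => res
        | (res, false) => pvOuter n fuel res (suffix + 1)
      else symbols

def generate_symbols (color_list : List Int) : List String :=
  let n := color_list.length
  if n ≤ 26 then (pvAlph.take n).map (fun c => String.ofList [c])
  else pvOuter n n [] 0

-- ===== PORT B =====
def generate_symbols_alt (color_list : List Int) : List String :=
  let n := color_list.length
  if n ≤ 26 then (pvAlph.take n).map (fun c => String.ofList [c])
  else (List.range n).map (fun i => String.ofList [pvAlph[i % 26]!] ++ PySem.Int.toStr ((i / 26 : Nat) : Int))

-- ===== PRECONDITION & SPEC =====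
def Spec_generate_symbols (color_list : List Int) (out : List String) : Prop := out = generate_symbols_alt color_list
instance (color_list : List Int) (out : List String) : Decidable (Spec_generate_symbols color_list out) := by unfold Spec_generate_symbols; infer_instance

-- ===== CLAIM (what is proved, stated in full; the proofs are below) =====
def Claim_equal_generate_symbols : Prop := ∀ (color_list : List Int), Dom_generate_symbols color_list → Spec_generate_symbols color_list (generate_symbols color_list)


-- ===== LEMMAS AND PROOFS =====
-- the closed-form symbol at index i (identical to the function B maps over range n)
def pvGen (i : Nat) : String :=
  String.ofList [pvAlph[i % 26]!] ++ PySem.Int.toStr ((i / 26 : Nat) : Int)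

lemma pvInner_spec (n s : Nat) : ∀ (cs : List Char) (L : Nat), L < n →
    (∀ k (h : k < cs.length), String.ofList [cs[k]] ++ PySem.Int.toStr (s : Int) = pvGen (L + k)) →
    pvInner n ((List.range L).map pvGen) s cs =
      if n ≤ L + cs.length then ((List.range n).map pvGen, true)
      else ((List.range (L + cs.length)).map pvGen, false) := by
  intro cs
  induction cs with
  | nil =>
      intro L hL _
      simp [pvInner]
      omega
  | cons c cs ih =>
      intro L hL hpt
      have h0 : String.ofList [c] ++ PySem.Int.toStr (s : Int) = pvGen L := by
        simpa using hpt 0 (by simp)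
      have hsym : (List.range L).map pvGen ++ [String.ofList [c] ++ PySem.Int.toStr (s : Int)]
          = (List.range (L + 1)).map pvGen := by
        rw [h0, List.range_succ, List.map_append]; simp
      simp only [pvInner, hsym]
      by_cases hn : n ≤ ((List.range (L + 1)).map pvGen).length
      · simp only [List.length_map, List.length_range] at hn
        have hEq : n = L + 1 := by omega
        simp [hEq]
      · simp only [List.length_map, List.length_range] at hn
        rw [if_neg (by simp; omega)]
        have := ih (L + 1) (by omega) (by
          intro k hk
          have := hpt (k + 1) (by simpa using Nat.succ_lt_succ hk)
          simpa [Nat.add_assoc, Nat.add_comm 1 k] using this)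
        rw [this]
        have harith : L + 1 + cs.length = L + (cs.length + 1) := by omega
        simp [harith]

lemma pvAlph_pt (s : Nat) : ∀ k (h : k < pvAlph.length),
    String.ofList [pvAlph[k]] ++ PySem.Int.toStr (s : Int) = pvGen (26 * s + k) := by
  intro k hk
  have hk26 : k < 26 := by simpa [pvAlph] using hk
  have h1 : (26 * s + k) % 26 = k := by omega
  have h2 : (26 * s + k) / 26 = s := by omega
  unfold pvGen
  rw [h1, h2, getElem!_pos pvAlph k hk]

lemma pvOuter_spec (n : Nat) : ∀ fuel s, 26 * s < n → n ≤ 26 * s + 26 * fuel →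
    pvOuter n fuel ((List.range (26 * s)).map pvGen) s = (List.range n).map pvGen := by
  intro fuel
  induction fuel with
  | zero => intro s h1 h2; omega
  | succ fuel ih =>
      intro s h1 h2
      have hlen : ((List.range (26 * s)).map pvGen).length < n := by simpa using h1
      have hinner := pvInner_spec n s pvAlph (26 * s) h1 (pvAlph_pt s)
      have hAl : pvAlph.length = 26 := by decide
      rw [hAl] at hinner
      simp only [pvOuter, if_pos hlen]
      by_cases hn : n ≤ 26 * s + 26
      · rw [hinner, if_pos hn]
      · rw [hinner, if_neg hn]
        have : 26 * s + 26 = 26 * (s + 1) := by ring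
        rw [this]
        exact ih (s + 1) (by omega) (by omega)

-- ===== VERDICT (by name: the statement is the Claim_ definition above) =====
theorem generate_symbols_spec : Claim_equal_generate_symbols := by
  intro cl _
  unfold Spec_generate_symbols generate_symbols generate_symbols_alt
  by_cases h : cl.length ≤ 26
  · simp [h]
  · simp only [h, if_false]
    have h0 : ([] : List String) = (List.range (26 * 0)).map pvGen := by simp
    rw [h0, pvOuter_spec cl.length cl.length 0 (by omega) (by omega)]
    rfl
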